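-- pv_equiv track=rewrite | github.com/TOMATOsJr/Text2Table | Post mid sub files _ rough/kg_to_table_csv.py | deduplicate_values
-- ===== SOURCE A (Python) =====
-- def deduplicate_values(values: list[str]) -> list[str]:
--     if not values:
--         return values
--
--     seen_lower: set[str] = set()
--     unique: list[str] = []
--     for value in values:
--         value = value.strip()
--         if not value:
--             continue
--         value_lower = value.lower()
--         if value_lower not in seen_lower:
--             seen_lower.add(value_lower)
--             unique.append(value)
--
--     if len(unique) <= 1:
--         return unique
--
--     sorted_by_length = sorted(unique, key=len, reverse=True)
--     kept: list[str] = []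
--     for value in sorted_by_length:
--         value_lower = value.lower()
--         absorbed = any(
--             value_lower in accepted.lower() and value_lower != accepted.lower()
--             for accepted in kept
--         )
--         if not absorbed:
--             kept.append(value)
--
--     return kept
-- ===== SOURCE B (Python) =====
-- def deduplicate_values(values: list[str]) -> list[str]:
--     seen_lower = set()
--     unique = []
--     for value in values:
--         value = value.strip()
--         if not value:
--             continue
--         value_lower = value.lower()
--         if value_lower not in seen_lower:
--             seen_lower.add(value_lower)
--             unique.append(value)
--
--     lows = [u.lower() for u in unique]
--     survivors = [v for v, lv in zip(unique, lows)
--                  if not any(len(lv) < len(u) and lv in u for u in lows)]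
--     return sorted(survivors, key=len, reverse=True)
-- ===== Notes on version B (the rewrite author's own statement) =====
-- stated objective: alternative
-- what changed: A's greedy second pass (sort by length desc, then keep a value only if it is not a proper case-insensitive substring of an already-kept value) is replaced by an order-independent pairwise test of every unique value against all unique values, followed by one stable length-descending sort; the case-insensitive dedup phase is kept.
import Mathlib
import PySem

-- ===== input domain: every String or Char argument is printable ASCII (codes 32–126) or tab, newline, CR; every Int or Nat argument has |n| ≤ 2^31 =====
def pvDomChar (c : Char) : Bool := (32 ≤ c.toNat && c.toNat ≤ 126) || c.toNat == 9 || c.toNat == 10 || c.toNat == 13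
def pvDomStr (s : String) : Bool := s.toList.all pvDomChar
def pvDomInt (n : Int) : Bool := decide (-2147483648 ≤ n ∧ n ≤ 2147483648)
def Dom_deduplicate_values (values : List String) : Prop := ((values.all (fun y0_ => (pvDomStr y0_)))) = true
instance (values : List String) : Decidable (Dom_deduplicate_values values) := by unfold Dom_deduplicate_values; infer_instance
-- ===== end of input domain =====

-- B replaces A's greedy scan over already-kept strings by an independent test of each
-- unique value against ALL unique values, followed by one stable length-descending sort
-- (alternative decomposition, same observable result).

-- ===== PORT A =====
def deduplicate_values (values : List String) : List String :=
  if values = [] then values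
  else
    let st := values.foldl
      (fun (st : PySem.Set String × List String) value =>
        let value := PySem.Str.strip value
        if value == "" then st
        else
          let value_lower := PySem.Str.lower value
          if st.1.contains value_lower then st
          else (st.1.add value_lower, st.2 ++ [value]))
      (PySem.Set.empty, [])
    let unique := st.2
    if unique.length ≤ 1 then unique
    else
      let sorted_by_length := PySem.List.sorted unique PySem.Str.len true
      sorted_by_length.foldl
        (fun kept value =>
          let value_lower := PySem.Str.lower value
          let absorbed := kept.any (fun accepted =>
            PySem.Str.isIn value_lower (PySem.Str.lower accepted) &&
              value_lower != PySem.Str.lower accepted)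
          if absorbed then kept else kept ++ [value])
        []

-- ===== PORT B =====
def deduplicate_values_alt (values : List String) : List String :=
  let st := values.foldl
    (fun (st : PySem.Set String × List String) value =>
      let value := PySem.Str.strip value
      if value == "" then st
      else
        let value_lower := PySem.Str.lower value
        if st.1.contains value_lower then st
        else (st.1.add value_lower, st.2 ++ [value]))
    (PySem.Set.empty, [])
  let unique := st.2
  let lows := unique.map PySem.Str.lower
  let survivors := ((unique.zip lows).filter (fun vl =>
    !(lows.any (fun u =>
      decide (PySem.Str.len vl.2 < PySem.Str.len u) && PySem.Str.isIn vl.2 u)))).map Prod.fst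
  PySem.List.sorted survivors PySem.Str.len true

-- ===== PRECONDITION & SPEC =====
def Spec_deduplicate_values (values : List String) (out : List String) : Prop := out = deduplicate_values_alt values
instance (values : List String) (out : List String) : Decidable (Spec_deduplicate_values values out) := by unfold Spec_deduplicate_values; infer_instance

-- ===== CLAIM (what is proved, stated in full; the proofs are below) =====
def Claim_equal_deduplicate_values : Prop := ∀ (values : List String), Dom_deduplicate_values values → Spec_deduplicate_values values (deduplicate_values values)

-- ===== LEMMAS AND PROOFS =====

-- (lower v) proper-infix (lower u), as A's and B's tests check it
def pvSub (v u : String) : Bool :=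
  PySem.Str.isIn (PySem.Str.lower v) (PySem.Str.lower u) &&
    PySem.Str.lower v != PySem.Str.lower u

-- length-descending order maintained by `sorted … true`
def pvDesc (a b : String) : Prop := PySem.Str.len b ≤ PySem.Str.len a

def pvBefore (a b : String) : Bool := decide (PySem.Str.len b < PySem.Str.len a)

-- `lower` is character-wise, hence length-preserving
theorem pvLow_len (v : String) :
    (PySem.Str.lower v).toList.length = v.toList.length := by
  rw [PySem.Str.toList_lower, PySem.Chars.lower, List.length_map]

theorem pvSub_lt {v u : String} (h : pvSub v u = true) :
    PySem.Str.len v < PySem.Str.len u := by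
  simp only [pvSub, Bool.and_eq_true, bne_iff_ne, ne_eq] at h
  obtain ⟨hin, hne⟩ := h
  have hinf := (PySem.Str.isIn_iff_infix _ _).mp hin
  have hle := hinf.length_le
  have hlt : (PySem.Str.lower v).toList.length < (PySem.Str.lower u).toList.length := by
    rcases lt_or_eq_of_le hle with h | h
    · exact h
    · exact absurd (String.toList_inj.mp (hinf.eq_of_length h)) hne
  rw [pvLow_len, pvLow_len] at hlt
  rw [PySem.Str.len_eq, PySem.Str.len_eq]
  exact_mod_cast hlt

theorem pvSub_eq_len (v t : String) :
    (decide (PySem.Str.len (PySem.Str.lower v) < PySem.Str.len (PySem.Str.lower t)) &&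
      PySem.Str.isIn (PySem.Str.lower v) (PySem.Str.lower t)) = pvSub v t := by
  rw [Bool.eq_iff_iff]
  simp only [Bool.and_eq_true, decide_eq_true_eq, pvSub, bne_iff_ne, ne_eq]
  constructor
  · rintro ⟨hlt, hin⟩
    exact ⟨hin, fun he => absurd hlt (by rw [he]; exact lt_irrefl _)⟩
  · rintro ⟨hin, hne⟩
    refine ⟨?_, hin⟩
    have hinf := (PySem.Str.isIn_iff_infix _ _).mp hin
    have hle := hinf.length_le
    rcases lt_or_eq_of_le hle with h | h
    · rw [PySem.Str.len_eq, PySem.Str.len_eq]; exact_mod_cast h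
    · exact absurd (String.toList_inj.mp (hinf.eq_of_length h)) hne

theorem pvMem_insertBy (b : String → String → Bool) (x y : String) (l : List String) :
    y ∈ PySem.List.insertBy b x l ↔ y = x ∨ y ∈ l := by
  induction l with
  | nil => simp [PySem.List.insertBy]
  | cons e t ih =>
    simp only [PySem.List.insertBy]
    split_ifs with h
    · simp [List.mem_cons]
    · simp only [List.mem_cons, ih]; tauto

theorem pvInsertBy_pairwise (x : String) (l : List String)
    (h : l.Pairwise pvDesc) :
    (PySem.List.insertBy pvBefore x l).Pairwise pvDesc := by
  induction l with
  | nil => simp [PySem.List.insertBy]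
  | cons e t ih =>
    rw [List.pairwise_cons] at h
    obtain ⟨he, ht⟩ := h
    simp only [PySem.List.insertBy]
    split_ifs with hb
    · have hxe : PySem.Str.len e < PySem.Str.len x := by
        simpa [pvBefore] using hb
      refine List.pairwise_cons.mpr ⟨?_, List.pairwise_cons.mpr ⟨he, ht⟩⟩
      intro y hy
      rcases List.mem_cons.mp hy with rfl | hy
      · exact le_of_lt hxe
      · exact le_trans (he y hy) (le_of_lt hxe)
    · have hex : PySem.Str.len x ≤ PySem.Str.len e := by
        simpa [pvBefore] using hb
      refine List.pairwise_cons.mpr ⟨?_, ih ht⟩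
      intro y hy
      rcases (pvMem_insertBy _ _ _ _).mp hy with rfl | hy
      · exact hex
      · exact he y hy

theorem pvInsertBy_front (x : String) (l : List String)
    (h : ∀ e ∈ l, pvBefore x e = true) :
    PySem.List.insertBy pvBefore x l = x :: l := by
  cases l with
  | nil => rfl
  | cons e t => simp [PySem.List.insertBy, h e (List.mem_cons_self)]

theorem pvInsertBy_cons (b : String → String → Bool) (x e : String) (t : List String) :
    PySem.List.insertBy b x (e :: t) =
      if b x e then x :: e :: t else e :: PySem.List.insertBy b x t := by
  simp [PySem.List.insertBy]

theorem pvInsertBy_filter (p : String → Bool) (x : String) (l : List String)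
    (h : l.Pairwise pvDesc) :
    (PySem.List.insertBy pvBefore x l).filter p =
      if p x then PySem.List.insertBy pvBefore x (l.filter p) else l.filter p := by
  induction l with
  | nil =>
    by_cases hx : p x <;> simp [PySem.List.insertBy, hx]
  | cons e t ih =>
    obtain ⟨he, ht⟩ := List.pairwise_cons.mp h
    by_cases hb : pvBefore x e = true
    · -- len e < len x : x goes to the front
      have hxe : PySem.Str.len e < PySem.Str.len x := by
        simpa [pvBefore] using hb
      rw [pvInsertBy_cons, if_pos hb]
      by_cases hx : p x
      · have hall : ∀ y ∈ (e :: t).filter p, pvBefore x y = true := by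
          intro y hy
          have hy' := List.mem_of_mem_filter hy
          have : PySem.Str.len y ≤ PySem.Str.len e := by
            rcases List.mem_cons.mp hy' with rfl | hy''
            · exact le_refl _
            · exact he y hy''
          simp only [pvBefore, decide_eq_true_eq]
          omega
        rw [if_pos hx, pvInsertBy_front x _ hall]
        simp [hx]
      · rw [if_neg hx]
        simp [hx]
    · -- x is inserted further down
      rw [pvInsertBy_cons, if_neg hb]
      by_cases hpe : p e <;> by_cases hx : p x <;>
        simp [hpe, hx, ih ht, pvInsertBy_cons, hb]

theorem pvFoldl_ins_pairwise (xs : List String) (acc : List String)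
    (h : acc.Pairwise pvDesc) :
    (xs.foldl (fun a x => PySem.List.insertBy pvBefore x a) acc).Pairwise pvDesc := by
  induction xs generalizing acc with
  | nil => exact h
  | cons x xs ih => exact ih _ (pvInsertBy_pairwise x acc h)

theorem pvFoldl_ins_filter (p : String → Bool) (xs : List String) (acc : List String)
    (h : acc.Pairwise pvDesc) :
    (xs.foldl (fun a x => PySem.List.insertBy pvBefore x a) acc).filter p =
      (xs.filter p).foldl (fun a x => PySem.List.insertBy pvBefore x a) (acc.filter p) := by
  induction xs generalizing acc with
  | nil => rfl
  | cons x xs ih =>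
    rw [List.foldl_cons, ih _ (pvInsertBy_pairwise x acc h)]
    rw [pvInsertBy_filter p x acc h]
    by_cases hx : p x <;> simp [hx]

theorem pvSorted_eq_foldl (xs : List String) :
    PySem.List.sorted xs PySem.Str.len true =
      xs.foldl (fun a x => PySem.List.insertBy pvBefore x a) [] := rfl

theorem pvSorted_pairwise (xs : List String) :
    (PySem.List.sorted xs PySem.Str.len true).Pairwise pvDesc := by
  rw [pvSorted_eq_foldl]
  exact pvFoldl_ins_pairwise xs [] List.Pairwise.nil

theorem pvSorted_filter (p : String → Bool) (xs : List String) :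
    (PySem.List.sorted xs PySem.Str.len true).filter p =
      PySem.List.sorted (xs.filter p) PySem.Str.len true := by
  rw [pvSorted_eq_foldl, pvSorted_eq_foldl]
  simpa using pvFoldl_ins_filter p xs [] List.Pairwise.nil

theorem pvLen_le_sum (L : List String) (x : String) (hx : x ∈ L) :
    x.toList.length ≤ (L.map (fun t => t.toList.length)).sum := by
  induction L with
  | nil => cases hx
  | cons e t ih =>
    rcases List.mem_cons.mp hx with rfl | hx
    · simp
    · have := ih hx
      simp only [List.map_cons, List.sum_cons]
      omega

-- every element of L has its lowercase an infix of the lowercase of some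
-- surviving (never-absorbed) element of L, at least as long as it
theorem pvExists_kept (L : List String) :
    ∀ (n : Nat) (u : String), u ∈ L →
      (∀ x ∈ L, PySem.Str.len x < PySem.Str.len u + n) →
      ∃ w ∈ L, (!(L.any (fun t => pvSub w t))) = true ∧
        (PySem.Str.lower u).toList <:+: (PySem.Str.lower w).toList ∧
        PySem.Str.len u ≤ PySem.Str.len w := by
  intro n
  induction n with
  | zero =>
    intro u hu hb
    have := hb u hu
    omega
  | succ n ih =>
    intro u hu hb
    by_cases hany : L.any (fun t => pvSub u t) = true
    · obtain ⟨u', hu', hsub⟩ := List.any_eq_true.mp hany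
      have hlt : PySem.Str.len u < PySem.Str.len u' := pvSub_lt hsub
      have hb' : ∀ x ∈ L, PySem.Str.len x < PySem.Str.len u' + n := by
        intro x hx
        have := hb x hx
        omega
      obtain ⟨w, hw, hkept, hinf, hle⟩ := ih u' hu' hb'
      refine ⟨w, hw, hkept, ?_, by omega⟩
      have h1 : (PySem.Str.lower u).toList <:+: (PySem.Str.lower u').toList := by
        have := (Bool.and_eq_true _ _).mp hsub
        exact (PySem.Str.isIn_iff_infix _ _).mp this.1
      exact h1.trans hinf
    · exact ⟨u, hu, by simp_all, List.infix_refl _, le_refl _⟩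

-- the greedy pass over the length-sorted list keeps exactly the elements whose
-- lowercase is a proper infix of no element of the list
theorem pvGreedy_filter (L : List String) (hpw : L.Pairwise pvDesc) :
    ∀ (s p : List String), p ++ s = L →
      s.foldl
        (fun kept value =>
          let value_lower := PySem.Str.lower value
          let absorbed := kept.any (fun accepted =>
            PySem.Str.isIn value_lower (PySem.Str.lower accepted) &&
              value_lower != PySem.Str.lower accepted)
          if absorbed then kept else kept ++ [value])
        (p.filter (fun v => !(L.any (fun t => pvSub v t)))) =
      (p ++ s).filter (fun v => !(L.any (fun t => pvSub v t))) := by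
  intro s
  induction s with
  | nil => intro p hp; simp
  | cons v s' ih =>
    intro p hp
    have hcond : ((p.filter (fun v => !(L.any (fun t => pvSub v t)))).any
        (fun a => pvSub v a)) = (L.any (fun t => pvSub v t)) := by
      rw [Bool.eq_iff_iff]
      constructor
      · intro h
        obtain ⟨a, ha, hsa⟩ := List.any_eq_true.mp h
        have haL : a ∈ L := by
          rw [← hp]
          exact List.mem_append_left _ (List.mem_of_mem_filter ha)
        exact List.any_eq_true.mpr ⟨a, haL, hsa⟩
      · intro h
        obtain ⟨u, huL, hsu⟩ := List.any_eq_true.mp h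
        obtain ⟨w, hwL, hkept, hinf, hle⟩ :=
          pvExists_kept L ((L.map (fun t => t.toList.length)).sum + 1) u huL
            (by
              intro x hx
              have h1 := pvLen_le_sum L x hx
              have h2 : (0:Int) ≤ PySem.Str.len u := by
                rw [PySem.Str.len_eq]; positivity
              rw [PySem.Str.len_eq]
              omega)
        have hvu : PySem.Str.len v < PySem.Str.len u := pvSub_lt hsu
        have hvw : PySem.Str.len v < PySem.Str.len w := by omega
        have hsvw : pvSub v w = true := by
          have h1 : (PySem.Str.lower v).toList <:+: (PySem.Str.lower u).toList := by
            have := (Bool.and_eq_true _ _).mp hsu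
            exact (PySem.Str.isIn_iff_infix _ _).mp this.1
          have h2 := h1.trans hinf
          have hne : PySem.Str.lower v ≠ PySem.Str.lower w := by
            intro he
            rw [PySem.Str.len_eq, PySem.Str.len_eq] at hvw
            have := pvLow_len v
            have := pvLow_len w
            have : v.toList.length = w.toList.length := by
              rw [← pvLow_len v, ← pvLow_len w, he]
            omega
          rw [pvSub]
          exact (Bool.and_eq_true _ _).mpr
            ⟨(PySem.Str.isIn_iff_infix _ _).mpr h2, by simpa using hne⟩
        -- w must lie in the already-processed prefix p
        have hwp : w ∈ p := by
          rcases List.mem_append.mp (by rw [hp]; exact hwL) with h | h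
          · exact h
          · exfalso
            rcases List.mem_cons.mp h with rfl | h
            · omega
            · have hpair := hpw
              rw [← hp] at hpair
              have hvs := (List.pairwise_append.mp hpair).2.1
              have := (List.pairwise_cons.mp hvs).1 w h
              rw [pvDesc] at this
              omega
        exact List.any_eq_true.mpr
          ⟨w, List.mem_filter.mpr ⟨hwp, hkept⟩, hsvw⟩
    rw [List.foldl_cons]
    have hstep :
        (let value_lower := PySem.Str.lower v
         let absorbed := (p.filter (fun v => !(L.any (fun t => pvSub v t)))).any
           (fun accepted =>
             PySem.Str.isIn value_lower (PySem.Str.lower accepted) &&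
               value_lower != PySem.Str.lower accepted)
         if absorbed then (p.filter (fun v => !(L.any (fun t => pvSub v t))))
         else (p.filter (fun v => !(L.any (fun t => pvSub v t)))) ++ [v]) =
        ((p ++ [v]).filter (fun v => !(L.any (fun t => pvSub v t)))) := by
      show (if (p.filter (fun v => !(L.any (fun t => pvSub v t)))).any
          (fun a => pvSub v a) then _ else _) = _
      rw [hcond]
      by_cases hv : L.any (fun t => pvSub v t) = true
      · simp [hv]
      · simp only [Bool.not_eq_true] at hv
        simp [hv]
    rw [hstep]
    have := ih (p ++ [v]) (by simpa using hp)
    simpa using this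

-- the whole pipeline after dedup: greedy over the sort equals sort of the global filter
theorem pvPipeline (U : List String) :
    (PySem.List.sorted U PySem.Str.len true).foldl
      (fun kept value =>
        let value_lower := PySem.Str.lower value
        let absorbed := kept.any (fun accepted =>
          PySem.Str.isIn value_lower (PySem.Str.lower accepted) &&
            value_lower != PySem.Str.lower accepted)
        if absorbed then kept else kept ++ [value])
      [] =
    PySem.List.sorted
      (((U.zip (U.map PySem.Str.lower)).filter (fun vl =>
        !((U.map PySem.Str.lower).any (fun u =>
          decide (PySem.Str.len vl.2 < PySem.Str.len u) && PySem.Str.isIn vl.2 u)))).map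
        Prod.fst)
      PySem.Str.len true := by
  set L := PySem.List.sorted U PySem.Str.len true with hL
  have hperm : L.Perm U := PySem.List.sorted_perm U PySem.Str.len true
  have hmain := pvGreedy_filter L (pvSorted_pairwise U) L [] rfl
  simp only [List.filter_nil, List.nil_append] at hmain
  rw [hmain]
  rw [← List.map_prod_left_eq_zip, List.filter_map, List.map_map]
  have hcompid : (Prod.fst ∘ fun v : String => (v, PySem.Str.lower v)) =
      (id : String → String) := rfl
  rw [hcompid, List.map_id]
  -- replace the L-based predicate by the one B evaluates (any over a permutation)
  have hpred : ∀ v, (!(L.any (fun t => pvSub v t))) =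
      ((fun vl : String × String =>
        !((U.map PySem.Str.lower).any (fun u =>
          decide (PySem.Str.len vl.2 < PySem.Str.len u) && PySem.Str.isIn vl.2 u))) ∘
        (fun v => (v, PySem.Str.lower v))) v := by
    intro v
    show (!(L.any (fun t => pvSub v t))) =
      !((U.map PySem.Str.lower).any (fun u =>
        decide (PySem.Str.len (PySem.Str.lower v) < PySem.Str.len u) &&
          PySem.Str.isIn (PySem.Str.lower v) u))
    have h1 : (L.any fun t => pvSub v t) = (U.any fun t => pvSub v t) := by
      rw [Bool.eq_iff_iff, List.any_eq_true, List.any_eq_true]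
      constructor
      · rintro ⟨t, ht, h⟩; exact ⟨t, hperm.mem_iff.mp ht, h⟩
      · rintro ⟨t, ht, h⟩; exact ⟨t, hperm.mem_iff.mpr ht, h⟩
    rw [h1, List.any_map]
    have hfe : ((fun u => decide (PySem.Str.len (PySem.Str.lower v) < PySem.Str.len u) &&
        PySem.Str.isIn (PySem.Str.lower v) u) ∘ PySem.Str.lower) =
        fun t => pvSub v t := by
      funext t
      exact pvSub_eq_len v t
    rw [hfe]
  rw [List.filter_congr (fun x _ => hpred x)]
  rw [pvSorted_filter]

-- ===== VERDICT (by name: the statement is the Claim_ definition above) =====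
theorem deduplicate_values_spec : Claim_equal_deduplicate_values := by
  intro values _
  show deduplicate_values values = deduplicate_values_alt values
  simp only [deduplicate_values, deduplicate_values_alt]
  by_cases hnil : values = []
  · subst hnil; rfl
  · rw [if_neg hnil]
    generalize (values.foldl
      (fun (st : PySem.Set String × List String) value =>
        let value := PySem.Str.strip value
        if value == "" then st
        else
          let value_lower := PySem.Str.lower value
          if st.1.contains value_lower then st
          else (st.1.add value_lower, st.2 ++ [value]))
      (PySem.Set.empty, [])) = stv
    obtain ⟨seen, U⟩ := stv
    simp only
    by_cases hlen : U.length ≤ 1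
    · -- short-circuit branch: unique has 0 or 1 elements
      rw [if_pos hlen]
      match U, hlen with
      | [], _ => rfl
      | [v], _ =>
        have h1 : (([v].zip ([v].map PySem.Str.lower)).filter (fun vl =>
            !(([v].map PySem.Str.lower).any (fun u =>
              decide (PySem.Str.len vl.2 < PySem.Str.len u) &&
                PySem.Str.isIn vl.2 u)))) = [(v, PySem.Str.lower v)] := by
          simp
        rw [h1]
        rfl
    · rw [if_neg hlen]
      exact pvPipeline U
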